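-- pv_equiv track=rewrite | github.com/Hyun-Ho95/CodingTest_Python-SQL | 프로그래머스/lv0/120863. 다항식 더하기/다항식 더하기.py | solution
-- ===== SOURCE A (Python) =====
-- def solution(polynomial):
--
--     polynomial_list = polynomial.split()
--     num_list = []
--     x_list = []
--     x_coef_list = []
--
--     for i in polynomial_list:
--         if i.isdigit():
--             num_list.append(int(i))
--         elif i != '+':
--             x_list.append(i)
--     for i in x_list:
--         if i=='x':
--             x_coef_list.append(1)
--         else:
--             x_coef_list.append(int(i[:-1]))
--
--     if sum(x_coef_list) ==0:
--         return f'{sum(num_list)}'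
--     elif sum(x_coef_list) ==1:
--         if sum(num_list) ==0:
--             return 'x'
--         else:
--             return f'x + {sum(num_list)}'
--     elif sum(num_list) == 0:
--         return f'{sum(x_coef_list)}x'
--     elif sum(x_coef_list) > 1:
--         if sum(num_list) ==0:
--             return f'{sum(x_coef_list)}x'
--         else:
--             return f'{sum(x_coef_list)}x + {sum(num_list)}'
-- ===== SOURCE B (Python) =====
-- def solution(polynomial):
--     coef = 0
--     const = 0
--     run = ''  # current run of digit characters
--     for ch in polynomial:
--         if ch.isdigit():
--             run += ch
--         elif ch == 'x':
--             coef += int(run) if run else 1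
--             run = ''
--         elif ch == '+' or ch.isspace():
--             if run:
--                 const += int(run)
--                 run = ''
--         else:
--             raise ValueError('unexpected character: ' + ch)
--     if run:
--         const += int(run)
--     parts = []
--     if coef == 1:
--         parts.append('x')
--     elif coef > 1:
--         parts.append(str(coef) + 'x')
--     if const > 0:
--         parts.append(str(const))
--     return ' + '.join(parts) if parts else '0'
-- ===== Notes on version B (the rewrite author's own statement) =====
-- stated objective: alternative
-- what changed: Replaces tokenize-with-split plus three intermediate lists plus a five-way elif formatting tree by a single character-level scanner that accumulates digit runs and credits each run at an 'x', '+' or whitespace boundary, then assembles the output parts and joins them.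
-- outside the precondition, e.g. on solution('-3x'): A returns '-3x', B raises ValueError
import Mathlib
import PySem

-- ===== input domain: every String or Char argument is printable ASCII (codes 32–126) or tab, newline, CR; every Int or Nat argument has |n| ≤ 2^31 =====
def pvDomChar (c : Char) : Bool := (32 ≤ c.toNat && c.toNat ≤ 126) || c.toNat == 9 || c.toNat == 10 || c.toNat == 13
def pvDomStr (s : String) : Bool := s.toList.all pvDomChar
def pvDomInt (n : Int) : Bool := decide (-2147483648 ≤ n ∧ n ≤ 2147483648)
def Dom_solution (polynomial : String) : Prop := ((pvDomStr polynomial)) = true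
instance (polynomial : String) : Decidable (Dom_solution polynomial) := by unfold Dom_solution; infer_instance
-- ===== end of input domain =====

-- B replaces A's split-into-tokens / three intermediate lists / five-way elif formatting tree by a
-- single character-level scan that accumulates digit runs and credits each run at an 'x' or
-- separator boundary, then assembles the output parts and joins them.

-- ===== PORT A =====
-- Port of A. Where Python's int() would raise ValueError (PySem.Int.ofStr? = none) the port uses
-- .getD 0, and where A falls off the end returning None it yields "" — both outside Pre_solution.
def solution (polynomial : String) : String :=
  let polynomialList := PySem.Str.split₀ polynomial
  let pair := polynomialList.foldl (fun (acc : List Int × List String) i =>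
      if PySem.Str.strIsdigit i then (acc.1 ++ [(PySem.Int.ofStr? i).getD 0], acc.2)
      else if i ≠ "+" then (acc.1, acc.2 ++ [i])
      else acc) ([], [])
  let numList := pair.1
  let xList := pair.2
  let xCoefList := xList.foldl (fun (acc : List Int) i =>
      if i = "x" then acc ++ [(1 : Int)]
      else acc ++ [(PySem.Int.ofStr? (PySem.Str.slice i none (some (-1)))).getD 0]) []
  if xCoefList.sum = 0 then PySem.Int.toStr numList.sum
  else if xCoefList.sum = 1 then
    (if numList.sum = 0 then "x" else "x + " ++ PySem.Int.toStr numList.sum)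
  else if numList.sum = 0 then PySem.Int.toStr xCoefList.sum ++ "x"
  else if xCoefList.sum > 1 then
    (if numList.sum = 0 then PySem.Int.toStr xCoefList.sum ++ "x"
     else PySem.Int.toStr xCoefList.sum ++ "x + " ++ PySem.Int.toStr numList.sum)
  else ""  -- A returns None here (negative coefficient sum); outside Pre_solution

-- ===== PORT B =====
-- the loop body of Source B's character scanner (state = (coef, const, run));
-- none = Source B's 'raise ValueError' on an unexpected character (outside Pre_solution)
def pvStep (s : Int × Int × List Char) (ch : Char) : Option (Int × Int × List Char) :=
  if PySem.Chars.isdigit ch then some (s.1, s.2.1, s.2.2 ++ [ch])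
  else if ch = 'x' then
    some (s.1 + (if s.2.2 ≠ [] then (PySem.Int.ofChars? s.2.2).getD 0 else 1), s.2.1, [])
  else if ch = '+' ∨ PySem.Chars.isspace ch then
    (if s.2.2 ≠ [] then some (s.1, s.2.1 + (PySem.Int.ofChars? s.2.2).getD 0, []) else some s)
  else none

def pvScan (o : Option (Int × Int × List Char)) (ch : Char) : Option (Int × Int × List Char) :=
  o.bind (fun s => pvStep s ch)

def solution_alt (polynomial : String) : String :=
  match polynomial.toList.foldl pvScan (some (0, 0, [])) with
  | none => ""  -- Source B raises ValueError here; outside Pre_solution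
  | some st =>
    let coef := st.1
    let const := if st.2.2 ≠ [] then st.2.1 + (PySem.Int.ofChars? st.2.2).getD 0 else st.2.1
    let parts : List String :=
      (if coef = 1 then ["x"]
       else if coef > 1 then [PySem.Int.toStr coef ++ "x"] else []) ++
      (if const > 0 then [PySem.Int.toStr const] else [])
    if parts = [] then "0" else PySem.Str.join " + " parts

-- ===== PRECONDITION & SPEC =====
-- a well-formed token: '+', 'x', a digit string, or a digit string followed by 'x'
def pvTokOK (t : List Char) : Bool :=
  t == ['+'] || t == ['x'] || PySem.Chars.strIsdigit t ||
    (PySem.Chars.strIsdigit t.dropLast && t.getLast? == some 'x')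

-- Pre_ excludes inputs containing a malformed token (outside the problem's grammar): on most of
-- them A raises ValueError or falls off the end returning None, and on the rest (a token with a
-- sign that Python's int() still parses, see cites) B's scanner rejects the character instead.
def Pre_solution (polynomial : String) : Prop :=
  ∀ t ∈ PySem.Str.split₀ polynomial, pvTokOK t.toList = true
instance (polynomial : String) : Decidable (Pre_solution polynomial) := by
  unfold Pre_solution; infer_instance

def pvWitness_solution : String := "3x + 7 + x + 0"

def Spec_solution (polynomial : String) (out : String) : Prop := out = solution_alt polynomial
instance (polynomial : String) (out : String) : Decidable (Spec_solution polynomial out) := by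
  unfold Spec_solution; infer_instance

-- ===== CLAIM (what is proved, stated in full; the proofs are below) =====
def Claim_equal_solution : Prop := ∀ (polynomial : String), Dom_solution polynomial → Pre_solution polynomial → Spec_solution polynomial (solution polynomial)

-- ===== LEMMAS AND PROOFS =====

-- per-token values used by the proofs (A side, String tokens)
def pvV (t : String) : Int := (PySem.Int.ofStr? t).getD 0
def pvSV (t : String) : Int := (PySem.Int.ofStr? (PySem.Str.slice t none (some (-1)))).getD 0
def pvCC (t : String) : Int :=
  if t = "+" then 0 else if t = "x" then 1
  else if PySem.Str.endswith t "x" then pvSV t else 0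
def pvDC (t : String) : Int :=
  if t = "+" then 0 else if t = "x" then 0
  else if PySem.Str.endswith t "x" then 0 else pvV t

-- ---------- A-side: the two list-building folds and their sums ----------

lemma pv_fold1_eq (toks : List String) (ns : List Int) (xs : List String) :
    toks.foldl (fun (acc : List Int × List String) i =>
      if PySem.Str.strIsdigit i then (acc.1 ++ [(PySem.Int.ofStr? i).getD 0], acc.2)
      else if i ≠ "+" then (acc.1, acc.2 ++ [i])
      else acc) (ns, xs)
    = (ns ++ (toks.filter (fun i => PySem.Str.strIsdigit i)).map pvV,
       xs ++ toks.filter (fun i => !PySem.Str.strIsdigit i && !(i == "+"))) := by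
  induction toks generalizing ns xs with
  | nil => simp
  | cons t ts ih =>
    simp only [List.foldl_cons]
    by_cases hd : PySem.Str.strIsdigit t
    · rw [if_pos hd, ih]
      have hd' : PySem.Chars.strIsdigit t.toList = true := by simpa [PySem.Str.strIsdigit] using hd
      simp [List.filter_cons, hd', pvV]
    · by_cases hp : t = "+"
      · rw [if_neg (by simpa [PySem.Str.strIsdigit] using hd), if_neg (by simp [hp]), ih]
        simp [List.filter_cons, hp, PySem.Chars.strIsdigit, PySem.Chars.isdigit]
      · rw [if_neg (by simpa [PySem.Str.strIsdigit] using hd), if_pos (by simp [hp]), ih]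
        have hd' : PySem.Chars.strIsdigit t.toList = false := by simpa [PySem.Str.strIsdigit] using hd
        simp [List.filter_cons, hd', hp]

lemma pv_fold2_eq (l : List String) (acc : List Int) :
    l.foldl (fun (acc : List Int) i =>
      if i = "x" then acc ++ [(1 : Int)]
      else acc ++ [(PySem.Int.ofStr? (PySem.Str.slice i none (some (-1)))).getD 0]) acc
    = acc ++ l.map (fun i => if i = "x" then (1 : Int) else pvSV i) := by
  induction l generalizing acc with
  | nil => simp
  | cons t ts ih =>
    by_cases hx : t = "x" <;> simp [hx, ih, pvSV]

lemma pv_optNat_nonneg (o : Option Nat) :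
    0 ≤ (Option.map (fun n : Int => n) (o.bind fun a => pure ((a : Int)))).getD 0 := by
  cases o <;> simp

lemma pv_ofChars_nonneg (cs : List Char) (h : ∀ c ∈ cs, PySem.Chars.isdigit c = true) :
    0 ≤ (PySem.Int.ofChars? cs).getD 0 := by
  simp only [PySem.Int.ofChars?]
  split
  · next ds hm =>
    exfalso
    have hmem : '-' ∈ cs := by
      have h1 : '-' ∈ (List.dropWhile PySem.Int.isIntSpace
          (List.dropWhile PySem.Int.isIntSpace cs).reverse).reverse := by
        rw [hm]; exact List.mem_cons_self
      have h2 := List.mem_reverse.mp h1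
      have h3 := (List.dropWhile_sublist _).mem h2
      have h4 := List.mem_reverse.mp h3
      exact (List.dropWhile_sublist _).mem h4
    have := h _ hmem
    simp [PySem.Chars.isdigit] at this
  · exact pv_optNat_nonneg _
  · exact pv_optNat_nonneg _

lemma pv_toList_plus : ("+" : String).toList = ['+'] := by decide
lemma pv_toList_x : ("x" : String).toList = ['x'] := by decide

lemma pv_digits_facts (t : String) (hd : PySem.Chars.strIsdigit t.toList = true) :
    t ≠ "+" ∧ t ≠ "x" ∧ PySem.Str.endswith t "x" = false ∧ 0 ≤ pvV t := by
  simp only [PySem.Chars.strIsdigit, Bool.and_eq_true, List.all_eq_true] at hd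
  obtain ⟨hne, hall⟩ := hd
  refine ⟨?_, ?_, ?_, ?_⟩
  · rintro rfl; have := hall '+' (by decide); simp [PySem.Chars.isdigit] at this
  · rintro rfl; have := hall 'x' (by decide); simp [PySem.Chars.isdigit] at this
  · rw [PySem.Str.endswith]
    by_contra hc
    rw [Bool.not_eq_false, PySem.Chars.endswith_iff] at hc
    have hmem : 'x' ∈ t.toList := hc.mem (by decide)
    have := hall 'x' hmem
    simp [PySem.Chars.isdigit] at this
  · exact pv_ofChars_nonneg _ hall

lemma pv_xdigits_facts (t : String)
    (hd : PySem.Chars.strIsdigit t.toList.dropLast = true)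
    (hl : t.toList.getLast? = some 'x') :
    PySem.Chars.strIsdigit t.toList = false ∧ t ≠ "+" ∧ t ≠ "x" ∧
      PySem.Str.endswith t "x" = true ∧ 0 ≤ pvSV t := by
  simp only [PySem.Chars.strIsdigit, Bool.and_eq_true, List.all_eq_true] at hd
  obtain ⟨hne, hall⟩ := hd
  have hnil : t.toList ≠ [] := by rintro h; rw [h] at hl; simp at hl
  have hsplit : t.toList.dropLast ++ ['x'] = t.toList := by
    have := List.dropLast_concat_getLast hnil
    rwa [List.getLast_eq_iff_getLast?_eq_some hnil |>.mpr hl] at this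
  refine ⟨?_, ?_, ?_, ?_, ?_⟩
  · by_contra hc
    rw [Bool.not_eq_false, PySem.Chars.strIsdigit, Bool.and_eq_true, List.all_eq_true] at hc
    have hmem : 'x' ∈ t.toList := by rw [← hsplit]; simp
    have := hc.2 'x' hmem
    simp [PySem.Chars.isdigit] at this
  · rintro rfl; simp [pv_toList_plus] at hl
  · rintro rfl
    rw [pv_toList_x] at hne
    simp at hne
  · rw [PySem.Str.endswith, PySem.Chars.endswith_iff]
    exact ⟨_, hsplit⟩
  · unfold pvSV
    rw [PySem.Int.ofStr?]
    rw [show (PySem.Str.slice t none (some (-1))).toList = t.toList.dropLast from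
      PySem.Str.slice_to_neg_one t]
    exact pv_ofChars_nonneg _ hall

lemma pv_shape (t : String) (h : pvTokOK t.toList = true) :
    t = "+" ∨ t = "x" ∨
    (PySem.Chars.strIsdigit t.toList = true ∧ t ≠ "+" ∧ t ≠ "x" ∧
      PySem.Str.endswith t "x" = false ∧ 0 ≤ pvV t) ∨
    (PySem.Chars.strIsdigit t.toList = false ∧ t ≠ "+" ∧ t ≠ "x" ∧
      PySem.Str.endswith t "x" = true ∧ 0 ≤ pvSV t) := by
  unfold pvTokOK at h
  simp only [Bool.or_eq_true, Bool.and_eq_true, beq_iff_eq] at h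
  rcases h with ((h | h) | h) | ⟨h1, h2⟩
  · exact Or.inl (String.toList_inj.mp (by rw [h, pv_toList_plus]))
  · exact Or.inr (Or.inl (String.toList_inj.mp (by rw [h, pv_toList_x])))
  · exact Or.inr (Or.inr (Or.inl ⟨h, pv_digits_facts t h⟩))
  · exact Or.inr (Or.inr (Or.inr (pv_xdigits_facts t h1 h2)))

lemma pv_sums (toks : List String) (h : ∀ t ∈ toks, pvTokOK t.toList = true) :
    ((toks.filter (fun i => !PySem.Str.strIsdigit i && !(i == "+"))).map
        (fun i => if i = "x" then (1 : Int) else pvSV i)).sum = (toks.map pvCC).sum ∧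
    ((toks.filter (fun i => PySem.Str.strIsdigit i)).map pvV).sum = (toks.map pvDC).sum ∧
    0 ≤ (toks.map pvCC).sum ∧ 0 ≤ (toks.map pvDC).sum := by
  induction toks with
  | nil => simp
  | cons t ts ih =>
    obtain ⟨ih1, ih2, ih3, ih4⟩ := ih (fun u hu => h u (List.mem_cons_of_mem t hu))
    have ht := pv_shape t (h t List.mem_cons_self)
    have e1 : PySem.Chars.strIsdigit ['+'] = false := by decide
    have e2 : PySem.Chars.strIsdigit ['x'] = false := by decide
    simp only [PySem.Str.strIsdigit] at ih1 ih2
    simp only [List.filter_cons, List.map, List.sum_cons, PySem.Str.strIsdigit]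
    rcases ht with rfl | rfl | ⟨h1, h2, h3, h4, h5⟩ | ⟨h1, h2, h3, h4, h5⟩ <;>
      [skip; skip;
       simp only [PySem.Str.endswith, pv_toList_x] at h4;
       simp only [PySem.Str.endswith, pv_toList_x] at h4]
    · simp [e1, pvCC, pvDC, ih1, ih2, ih3, ih4]
    · simp [e2, pvCC, pvDC, ih1, ih2]
      refine ⟨?_, ?_⟩ <;> omega
    · simp [h1, h2, h3, h4, pvCC, pvDC, ih1, ih2]
      refine ⟨?_, ?_⟩ <;> omega
    · simp [h1, h2, h3, h4, pvCC, pvDC, ih1, ih2]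
      refine ⟨?_, ?_⟩ <;> omega

-- ---------- B-side: the character scanner against split₀ ----------

-- per-token values on char-list tokens
def pvCCl (t : List Char) : Int := pvCC (String.ofList t)
def pvDCl (t : List Char) : Int := pvDC (String.ofList t)
def pvRunVal (run : List Char) : Int := (PySem.Int.ofChars? run).getD 0

-- the scanner state determined by the in-order partial token p (relative offsets c0, n0)
def pvRun (p : List Char) : List Char := if p.all PySem.Chars.isdigit && !p.isEmpty then p else []
def pvCredit (p : List Char) : Int :=
  if p.getLast? = some 'x' then (if p.dropLast = [] then 1 else pvRunVal p.dropLast) else 0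
def pvFinal (s : Int × Int × List Char) : Int × Int :=
  (s.1, if s.2.2 ≠ [] then s.2.1 + pvRunVal s.2.2 else s.2.1)

-- shapes a partial token can have (prefix of a well-formed token)
def pvCurOK (p : List Char) : Prop :=
  p = [] ∨ (p.getLast? = some '+' ∧ p.dropLast = []) ∨
    (p ≠ [] ∧ p.all PySem.Chars.isdigit = true) ∨
    (p.getLast? = some 'x' ∧ p.dropLast.all PySem.Chars.isdigit = true)

lemma pv_space_char (c : Char) (h : PySem.Chars.isspace c = true) :
    PySem.Chars.isdigit c = false ∧ c ≠ 'x' := by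
  simp only [PySem.Chars.isspace, decide_eq_true_eq, Bool.or_eq_true, Bool.and_eq_true,
    Char.toNat] at h
  have h0 : ('0' : Char).val.toNat = 48 := by decide
  have h9 : ('9' : Char).val.toNat = 57 := by decide
  refine ⟨?_, ?_⟩
  · simp only [PySem.Chars.isdigit, Bool.and_eq_false_iff, decide_eq_false_iff_not, Char.le_def,
      UInt32.le_iff_toNat_le, h0, h9]
    omega
  · rintro rfl
    exact absurd h (by decide)

-- equation lemmas for PySem.Chars.split₀.go
lemma pv_go_nil (cur : List Char) (acc : List (List Char)) :
    PySem.Chars.split₀.go [] cur acc =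
      if cur.isEmpty then acc.reverse else (cur.reverse :: acc).reverse := by
  simp [PySem.Chars.split₀.go]

lemma pv_go_space (c : Char) (rest cur : List Char) (acc : List (List Char))
    (h : PySem.Chars.isspace c = true) :
    PySem.Chars.split₀.go (c :: rest) cur acc =
      if cur.isEmpty then PySem.Chars.split₀.go rest [] acc
      else PySem.Chars.split₀.go rest [] (cur.reverse :: acc) := by
  rw [PySem.Chars.split₀.go.eq_def]; simp [h]

lemma pv_go_nonspace (c : Char) (rest cur : List Char) (acc : List (List Char))
    (h : PySem.Chars.isspace c = false) :
    PySem.Chars.split₀.go (c :: rest) cur acc = PySem.Chars.split₀.go rest (c :: cur) acc := by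
  rw [PySem.Chars.split₀.go.eq_def]; simp [h]

lemma pv_go_acc (cs : List Char) : ∀ (cur : List Char) (acc : List (List Char)),
    PySem.Chars.split₀.go cs cur acc = acc.reverse ++ PySem.Chars.split₀.go cs cur [] := by
  induction cs with
  | nil =>
    intro cur acc
    by_cases h : cur.isEmpty <;> simp [pv_go_nil, h]
  | cons c rest ih =>
    intro cur acc
    by_cases hs : PySem.Chars.isspace c
    · rw [pv_go_space _ _ _ _ hs, pv_go_space _ _ _ _ hs]
      by_cases hc : cur.isEmpty
      · simp only [hc, if_true]
        exact ih [] acc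
      · simp only [hc, Bool.false_eq_true, ite_false]
        rw [ih [] (cur.reverse :: acc), ih [] [cur.reverse]]
        simp
    · rw [pv_go_nonspace _ _ _ _ (by simpa using hs),
        pv_go_nonspace _ _ _ _ (by simpa using hs)]
      exact ih _ _

lemma pv_go_head (cs : List Char) : ∀ (cur : List Char), cur ≠ [] →
    ∃ t ts, PySem.Chars.split₀.go cs cur [] = t :: ts ∧ cur.reverse <+: t := by
  induction cs with
  | nil =>
    intro cur hc
    refine ⟨cur.reverse, [], ?_, List.prefix_refl _⟩
    rw [pv_go_nil]
    simp [hc]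
  | cons c rest ih =>
    intro cur hc
    by_cases hs : PySem.Chars.isspace c
    · rw [pv_go_space _ _ _ _ hs]
      rw [if_neg (by simpa [List.isEmpty_iff] using hc)]
      rw [pv_go_acc rest [] [cur.reverse]]
      exact ⟨cur.reverse, PySem.Chars.split₀.go rest [] [], by simp, List.prefix_refl _⟩
    · rw [pv_go_nonspace _ _ _ _ (by simpa using hs)]
      obtain ⟨t, ts, hgo, hpre⟩ := ih (c :: cur) (by simp)
      refine ⟨t, ts, hgo, ?_⟩
      exact List.IsPrefix.trans (by simp [List.reverse_cons]) hpre

lemma pv_prefix_singleton (p : List Char) (a : Char) (h : p <+: [a]) : p = [] ∨ p = [a] := by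
  obtain ⟨r, hr⟩ := h
  cases p with
  | nil => exact Or.inl rfl
  | cons x xs =>
    simp only [List.cons_append, List.cons.injEq] at hr
    obtain ⟨rfl, hr2⟩ := hr
    have : xs = [] := by
      cases xs with
      | nil => rfl
      | cons y ys => simp at hr2
    exact Or.inr (by rw [this])

lemma pv_prefix_shape (t p : List Char) (hok : pvTokOK t = true) (hp : p <+: t) : pvCurOK p := by
  unfold pvTokOK at hok
  simp only [Bool.or_eq_true, Bool.and_eq_true, beq_iff_eq] at hok
  rcases hok with ((h | h) | h) | ⟨h1, h2⟩
  · subst h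
    rcases pv_prefix_singleton p _ hp with rfl | rfl
    · exact Or.inl rfl
    · exact Or.inr (Or.inl ⟨rfl, rfl⟩)
  · subst h
    rcases pv_prefix_singleton p _ hp with rfl | rfl
    · exact Or.inl rfl
    · exact Or.inr (Or.inr (Or.inr ⟨rfl, rfl⟩))
  · -- t is all digits
    simp only [PySem.Chars.strIsdigit, Bool.and_eq_true, List.all_eq_true] at h
    rcases eq_or_ne p [] with rfl | hne
    · exact Or.inl rfl
    · refine Or.inr (Or.inr (Or.inl ⟨hne, ?_⟩))
      simp only [List.all_eq_true]
      exact fun c hc => h.2 c (hp.subset hc)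
  · -- t = ds ++ ['x'] with ds nonempty digits
    simp only [PySem.Chars.strIsdigit, Bool.and_eq_true, List.all_eq_true, beq_iff_eq] at h1 h2
    have hnil : t ≠ [] := by rintro rfl; simp at h2
    have hsplit : t.dropLast ++ ['x'] = t := by
      have := List.dropLast_concat_getLast hnil
      rwa [List.getLast_eq_iff_getLast?_eq_some hnil |>.mpr h2] at this
    rw [← hsplit] at hp
    rcases List.prefix_concat_iff.mp (by simpa [List.concat_eq_append] using hp) with heq | hpre
    · subst heq
      refine Or.inr (Or.inr (Or.inr ⟨by simp, ?_⟩))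
      rw [List.dropLast_concat]
      simp only [List.all_eq_true]
      exact h1.2
    · rcases eq_or_ne p [] with rfl | hne
      · exact Or.inl rfl
      · refine Or.inr (Or.inr (Or.inl ⟨hne, ?_⟩))
        simp only [List.all_eq_true]
        exact fun c hc => h1.2 c (hpre.subset hc)

lemma pv_step_space (a b : Int) (r : List Char) (c : Char) (h : PySem.Chars.isspace c = true) :
    pvStep (a, b, r) c = some (a, (pvFinal (a, b, r)).2, []) := by
  obtain ⟨hd, hx⟩ := pv_space_char c h
  unfold pvStep pvFinal
  simp only [hd, Bool.false_eq_true, if_false, hx, ite_false, if_pos (Or.inr h)]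
  by_cases hr : r = [] <;> simp [hr, pvRunVal]

lemma pv_credit_digits (p : List Char) (h : p.all PySem.Chars.isdigit = true) : pvCredit p = 0 := by
  unfold pvCredit
  cases hl : p.getLast? with
  | none => simp
  | some d =>
    have hd : PySem.Chars.isdigit d = true := by
      simp only [List.all_eq_true] at h
      exact h d (List.mem_of_getLast? hl)
    rw [if_neg]
    simp only [Option.some.injEq]
    rintro rfl
    exact absurd hd (by decide)

lemma pv_step_next (p : List Char) (c : Char) (hok : pvCurOK (p ++ [c])) (c0 n0 : Int) :
    pvStep (c0 + pvCredit p, n0, pvRun p) c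
      = some (c0 + pvCredit (p ++ [c]), n0, pvRun (p ++ [c])) := by
  rcases hok with h | ⟨h1, h2⟩ | ⟨_, h⟩ | ⟨h1, h2⟩
  · simp at h
  · -- p ++ [c] ends with '+' and has empty dropLast: p = [], c = '+'
    rw [List.getLast?_concat] at h1
    rw [List.dropLast_concat] at h2
    obtain rfl : c = '+' := by simpa using h1
    subst h2
    have d1 : PySem.Chars.isdigit '+' = false := by decide
    have d2 : ('+' : Char) ≠ 'x' := by decide
    simp [pvStep, pvCredit, pvRun, d1, d2]
  · -- p ++ [c] is a nonempty digit run
    simp only [List.all_append, List.all_cons, List.all_nil, Bool.and_true,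
      Bool.and_eq_true] at h
    obtain ⟨hp, hc⟩ := h
    rw [pv_credit_digits p hp, pv_credit_digits (p ++ [c]) (by simp [hp, hc])]
    unfold pvStep pvRun
    simp only [hc, if_true]
    by_cases hpe : p = [] <;> simp [hpe, hp, hc]
  · -- p ++ [c] ends with 'x', dropLast = p all digits: c = 'x'
    rw [List.getLast?_concat] at h1
    rw [List.dropLast_concat] at h2
    obtain rfl : c = 'x' := by simpa using h1
    rw [pv_credit_digits p h2]
    unfold pvStep pvCredit pvRun
    have hxd : PySem.Chars.isdigit 'x' = false := by decide
    by_cases hpe : p = []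
    · subst hpe; simp [hxd]
    · have hrp : (if p.all PySem.Chars.isdigit && !p.isEmpty then p else []) = p := by
        simp [h2, List.isEmpty_iff, hpe]
      rw [hrp]
      simp [hxd, hpe, h2, pvRunVal, List.getLast?_concat]

lemma pv_tok_cc (t : List Char) (hok : pvTokOK t = true) :
    pvCCl t = pvCredit t ∧
      pvDCl t = (if pvRun t ≠ [] then pvRunVal (pvRun t) else 0) := by
  have htl : (String.ofList t).toList = t := String.toList_ofList
  have hshape := pv_shape (String.ofList t) (by rw [htl]; exact hok)
  rcases hshape with h | h | ⟨h1, h2, h3, h4, _⟩ | ⟨h1, h2, h3, h4, _⟩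
  · -- t = ['+']
    obtain rfl : t = ['+'] := by rw [← htl, h, pv_toList_plus]
    unfold pvCCl pvDCl pvCredit pvRun
    rw [h]
    simp [pvCC, pvDC, (by decide : PySem.Chars.isdigit '+' = false)]
  · -- t = ['x']
    obtain rfl : t = ['x'] := by rw [← htl, h, pv_toList_x]
    unfold pvCCl pvDCl pvCredit pvRun
    rw [h]
    simp [pvCC, pvDC, (by decide : PySem.Chars.isdigit 'x' = false)]
  · -- t a nonempty digit run
    rw [htl] at h1
    simp only [PySem.Chars.strIsdigit, Bool.and_eq_true] at h1
    obtain ⟨hne, hall⟩ := h1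
    have htne : t ≠ [] := by
      intro hcontra
      rw [hcontra] at hne
      simp at hne
    constructor
    · unfold pvCCl pvCC
      rw [if_neg h2, if_neg h3, if_neg (by rw [h4]; decide)]
      exact (pv_credit_digits t hall).symm
    · have hr : pvRun t = t := by
        unfold pvRun
        rw [if_pos (by simp [hall, hne])]
      rw [hr, if_pos htne]
      unfold pvDCl pvDC pvV pvRunVal
      rw [if_neg h2, if_neg h3, if_neg (by rw [h4]; decide), PySem.Int.ofStr?, htl]
  · -- t = digits ++ ['x']
    rw [htl] at h1
    have hxl : t.getLast? = some 'x' ∧ t.dropLast.all PySem.Chars.isdigit = true := by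
      unfold pvTokOK at hok
      simp only [Bool.or_eq_true, Bool.and_eq_true, beq_iff_eq] at hok
      rcases hok with ((h | h) | h) | ⟨g1, g2⟩
      · exact absurd h2 (by rw [← htl, h, pv_toList_plus]; simp)
      · exact absurd h3 (by rw [← htl, h, pv_toList_x]; simp)
      · exact absurd h (by simp [h1])
      · refine ⟨by simpa using g2, ?_⟩
        simp only [PySem.Chars.strIsdigit, Bool.and_eq_true, List.all_eq_true] at g1
        simp only [List.all_eq_true]
        exact g1.2
    obtain ⟨hlast, hdl⟩ := hxl
    have hdln : t.dropLast ≠ [] := by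
      unfold pvTokOK at hok
      simp only [Bool.or_eq_true, Bool.and_eq_true, beq_iff_eq] at hok
      rcases hok with ((h | h) | h) | ⟨g1, g2⟩
      · exact absurd h2 (by rw [← htl, h, pv_toList_plus]; simp)
      · exact absurd h3 (by rw [← htl, h, pv_toList_x]; simp)
      · exact absurd h (by simp [h1])
      · simp only [PySem.Chars.strIsdigit, Bool.and_eq_true] at g1
        simpa [List.isEmpty_iff] using g1.1
    have hrun : pvRun t = [] := by
      unfold pvRun
      rw [if_neg]
      intro hcontra
      simp only [Bool.and_eq_true, List.all_eq_true] at hcontra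
      have hmem : 'x' ∈ t := by
        have hnil : t ≠ [] := by rintro rfl; simp at hlast
        exact List.mem_of_getLast? hlast
      exact absurd (hcontra.1 'x' hmem) (by decide)
    constructor
    · unfold pvCCl pvCC pvSV pvCredit
      rw [if_neg h2, if_neg h3, if_pos h4, if_pos hlast, if_neg hdln]
      unfold pvRunVal
      rw [PySem.Int.ofStr?]
      rw [show (PySem.Str.slice (String.ofList t) none (some (-1))).toList
            = (String.ofList t).toList.dropLast from PySem.Str.slice_to_neg_one _, htl]
    · unfold pvDCl pvDC
      rw [if_neg h2, if_neg h3, if_pos h4, hrun]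
      simp

lemma pv_scan_go (cs : List Char) : ∀ (cur : List Char) (c0 n0 : Int),
    pvCurOK cur.reverse →
    (∀ t ∈ PySem.Chars.split₀.go cs cur [], pvTokOK t = true) →
    Option.map pvFinal
        (cs.foldl pvScan (some (c0 + pvCredit cur.reverse, n0, pvRun cur.reverse)))
      = some (c0 + ((PySem.Chars.split₀.go cs cur []).map pvCCl).sum,
          n0 + ((PySem.Chars.split₀.go cs cur []).map pvDCl).sum) := by
  induction cs with
  | nil =>
    intro cur c0 n0 _ htoks
    rw [pv_go_nil] at htoks ⊢
    by_cases hc : cur.isEmpty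
    · rw [if_pos hc] at htoks ⊢
      obtain rfl : cur = [] := by simpa [List.isEmpty_iff] using hc
      simp [pvFinal, pvCredit, pvRun]
    · rw [if_neg hc] at htoks ⊢
      have hok := htoks cur.reverse (by simp)
      obtain ⟨hcc, hdc⟩ := pv_tok_cc cur.reverse hok
      simp only [List.foldl_nil, List.reverse_cons, List.reverse_nil, List.nil_append,
        List.map_cons, List.map_nil, List.sum_cons, List.sum_nil, Int.add_zero,
        Option.map_some, Option.some.injEq]
      unfold pvFinal
      rw [hcc, hdc]
      by_cases hr : pvRun cur.reverse = [] <;> simp [hr]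
  | cons c rest ih =>
    intro cur c0 n0 hcur htoks
    by_cases hs : PySem.Chars.isspace c
    · rw [pv_go_space _ _ _ _ hs] at htoks ⊢
      simp only [List.foldl_cons, pvScan, Option.bind_some]
      rw [pv_step_space _ _ _ _ hs]
      by_cases hc : cur.isEmpty
      · rw [if_pos hc] at htoks ⊢
        obtain rfl : cur = [] := by simpa [List.isEmpty_iff] using hc
        have h0 : pvCredit ([] : List Char).reverse = 0 := by simp [pvCredit]
        have h1 : pvRun ([] : List Char).reverse = [] := by simp [pvRun]
        rw [show (pvFinal (c0 + pvCredit ([] : List Char).reverse, n0,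
              pvRun ([] : List Char).reverse)).2 = n0 by simp [pvFinal, pvRun]]
        rw [h0]
        exact ih [] c0 n0 (Or.inl rfl) htoks
      · rw [if_neg hc] at htoks ⊢
        rw [pv_go_acc rest [] [cur.reverse]] at htoks ⊢
        simp only [List.reverse_cons, List.reverse_nil, List.nil_append] at htoks ⊢
        have hok := htoks cur.reverse (by simp)
        obtain ⟨hcc, hdc⟩ := pv_tok_cc cur.reverse hok
        have hflush : (pvFinal (c0 + pvCredit cur.reverse, n0, pvRun cur.reverse)).2
            = n0 + pvDCl cur.reverse := by
          unfold pvFinal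
          rw [hdc]
          by_cases hr : pvRun cur.reverse = [] <;> simp [hr]
        rw [hflush]
        have hstate : (c0 + pvCredit cur.reverse, n0 + pvDCl cur.reverse, ([] : List Char))
            = ((c0 + pvCCl cur.reverse) + pvCredit ([] : List Char).reverse,
               n0 + pvDCl cur.reverse, pvRun ([] : List Char).reverse) := by
          rw [hcc]
          simp [pvCredit, pvRun]
        rw [hstate, ih [] (c0 + pvCCl cur.reverse) (n0 + pvDCl cur.reverse) (Or.inl rfl)
          (fun t ht => htoks t (List.mem_append_right _ ht))]
        simp only [List.singleton_append, List.map_cons, List.sum_cons,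
          Option.some.injEq, Prod.mk.injEq]
        constructor <;> ring
    · rw [pv_go_nonspace _ _ _ _ (by simpa using hs)] at htoks ⊢
      have hnew : pvCurOK (c :: cur).reverse := by
        obtain ⟨t, ts, hgo, hpre⟩ := pv_go_head rest (c :: cur) (by simp)
        have hok := htoks t (by rw [hgo]; exact List.mem_cons_self)
        exact pv_prefix_shape t _ hok hpre
      simp only [List.foldl_cons, pvScan, Option.bind_some]
      have hstep := pv_step_next cur.reverse c
        (by simpa [List.reverse_cons] using hnew) c0 n0
      rw [hstep]
      have := ih (c :: cur) c0 n0 hnew htoks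
      simpa [List.reverse_cons] using this

-- ---------- formatting ----------

lemma pv_join_one (a : String) : PySem.Str.join " + " [a] = a := by
  apply String.toList_inj.mp
  rw [PySem.Str.toList_join]
  simp [PySem.Chars.join_singleton]

lemma pv_join_two (a b : String) : PySem.Str.join " + " [a, b] = a ++ " + " ++ b := by
  apply String.toList_inj.mp
  rw [PySem.Str.toList_join]
  simp [PySem.Chars.join_cons_cons, PySem.Chars.join_singleton, String.toList_append]

lemma pv_toStr_zero : PySem.Int.toStr 0 = "0" := by decide

lemma pv_format (S C : Int) (hS : 0 ≤ S) (hC : 0 ≤ C) :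
    (if S = 0 then PySem.Int.toStr C
     else if S = 1 then (if C = 0 then "x" else "x + " ++ PySem.Int.toStr C)
     else if C = 0 then PySem.Int.toStr S ++ "x"
     else if S > 1 then
       (if C = 0 then PySem.Int.toStr S ++ "x" else PySem.Int.toStr S ++ "x + " ++ PySem.Int.toStr C)
     else "")
    = (let parts : List String :=
        (if S = 1 then ["x"] else if S > 1 then [PySem.Int.toStr S ++ "x"] else []) ++
        (if C > 0 then [PySem.Int.toStr C] else [])
       if parts = [] then "0" else PySem.Str.join " + " parts) := by
  rcases lt_trichotomy S 1 with h1 | rfl | h1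
  · have hS0 : S = 0 := by omega
    subst hS0
    rcases eq_or_lt_of_le hC with rfl | hCpos
    · simp [pv_toStr_zero]
    · have hC0 : ¬ (C = 0) := by omega
      simp [hCpos, pv_join_one]
  · rcases eq_or_lt_of_le hC with rfl | hCpos
    · simp [pv_join_one]
    · have hC0 : ¬ (C = 0) := by omega
      have h10 : ¬ ((1:Int) = 0) := by omega
      simp [hC0, hCpos, h10, pv_join_two]
  · have h0 : ¬ (S = 0) := by omega
    have hne1 : ¬ (S = 1) := by omega
    rcases eq_or_lt_of_le hC with rfl | hCpos
    · have hc0 : ¬ ((0:Int) > 0) := by omega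
      simp [h0, hne1, h1, pv_join_one]
    · have hC0 : ¬ (C = 0) := by omega
      simp [h0, hne1, h1, hC0, hCpos, pv_join_two]
      apply String.toList_inj.mp
      simp [String.toList_append]

-- ===== VERDICT (by name: the statement is the Claim_ definition above) =====
theorem solution_spec : Claim_equal_solution := by
  intro polynomial _ hpre
  unfold Spec_solution solution solution_alt
  simp only
  rw [pv_fold1_eq, pv_fold2_eq]
  obtain ⟨h1, h2, hS, hC⟩ := pv_sums (PySem.Str.split₀ polynomial) hpre
  simp only [List.nil_append, h1, h2]
  have htoksChar : ∀ t ∈ PySem.Chars.split₀.go polynomial.toList [] [], pvTokOK t = true := by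
    intro t ht
    have hmem : String.ofList t ∈ PySem.Str.split₀ polynomial :=
      List.mem_map_of_mem ht
    have := hpre (String.ofList t) hmem
    rwa [String.toList_ofList] at this
  have hscan := pv_scan_go polynomial.toList [] 0 0 (Or.inl rfl) htoksChar
  have hinit : ((0 : Int) + pvCredit ([] : List Char).reverse, (0 : Int),
      pvRun ([] : List Char).reverse) = ((0 : Int), (0 : Int), ([] : List Char)) := by
    simp [pvCredit, pvRun]
  rw [hinit] at hscan
  have hsum1 : ((PySem.Str.split₀ polynomial).map pvCC).sum
      = ((PySem.Chars.split₀.go polynomial.toList [] []).map pvCCl).sum := by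
    show (((PySem.Chars.split₀ polynomial.toList).map String.ofList).map pvCC).sum = _
    rw [List.map_map]
    rfl
  have hsum2 : ((PySem.Str.split₀ polynomial).map pvDC).sum
      = ((PySem.Chars.split₀.go polynomial.toList [] []).map pvDCl).sum := by
    show (((PySem.Chars.split₀ polynomial.toList).map String.ofList).map pvDC).sum = _
    rw [List.map_map]
    rfl
  cases hfold : polynomial.toList.foldl pvScan (some ((0 : Int), (0 : Int), ([] : List Char))) with
  | none => rw [hfold] at hscan; simp at hscan
  | some st =>
    rw [hfold] at hscan
    simp only [Option.map_some, Option.some.injEq] at hscan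
    have hcoef : st.1 = ((PySem.Str.split₀ polynomial).map pvCC).sum := by
      have := congrArg Prod.fst hscan
      simpa [pvFinal, hsum1] using this
    have hconst : (if st.2.2 ≠ [] then
          st.2.1 + (PySem.Int.ofChars? st.2.2).getD 0 else st.2.1)
        = ((PySem.Str.split₀ polynomial).map pvDC).sum := by
      have := congrArg Prod.snd hscan
      simp only [pvFinal, pvRunVal] at this
      rw [hsum2]
      simpa using this
    dsimp only
    rw [hcoef, hconst]
    have := pv_format ((PySem.Str.split₀ polynomial).map pvCC).sum
      ((PySem.Str.split₀ polynomial).map pvDC).sum hS hC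
    simpa using this
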